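-- pv_equiv track=rewrite | github.com/banbiossa/algomethod | src/myalgo/ninety/p81_5_friendly_group.py | _main
-- ===== SOURCE A (Python) =====
-- from itertools import accumulate
--
-- def _main(N, K, query):
--     # 2次元累積和を取る
--     x_max = max(i for i, j in query)
--     y_max = max(j for i, j in query)
--     MAX = min(5000, max(x_max, y_max)) + 1
--     grid = [[0] * MAX for _ in range(MAX)]
--     for a, b in query:
--         grid[a][b] += 1
--
--     # 行方向の cumsum
--     row_sum = [list(accumulate(row)) for row in grid]
--
--     # 列方向にさらに sum
--     col_sum = [list(accumulate(row_sum[i][j] for i in range(MAX))) for j in range(MAX)]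
--
--     # 転地してcumsumになる
--     cum_sum = [[col_sum[j][i] for j in range(MAX)] for i in range(MAX)]
--
--     # i, j range(5000), range(5000) に対して
--     p_grid = [[0] * MAX for _ in range(MAX)]
--     for i in range(1, MAX):
--         for j in range(1, MAX):
--             try:
--                 p_grid[i][j] = (
--                     cum_sum[i - 1][j - 1]
--                     + cum_sum[i + K][j + K]
--                     - cum_sum[i - 1][j + K]
--                     - cum_sum[i + K][j - 1]
--                 )
--             except Exception:
--                 continue
--     # Prx,ry - Plx-1,ry - Prx,ly-1 + Plx-1,ly-1 を計算
--     # その max を返す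
--     return max(max(row) for row in p_grid)
-- ===== SOURCE B (Python) =====
-- # B: coordinate-compressed sweep. The board has cells 1..side (side inferred from the
-- # coordinates, capped at 5000, as the function sizes its grid); a window is a (K+1)x(K+1)
-- # square [cx, cx+K] x [cy, cy+K] inside the board.  Some optimal window has cx = max(1, a-K)
-- # for the x-maximal point a it contains, and likewise for cy, so it suffices to scan the
-- # point-anchored candidate windows, counting each strip's y-values by binary search.
--
-- def _count_le(ys, v):
--     # number of elements <= v in the ascending list ys (bisect_right)
--     lo, hi = 0, len(ys)
--     while lo < hi:
--         mid = (lo + hi) // 2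
--         if ys[mid] <= v:
--             lo = mid + 1
--         else:
--             hi = mid
--     return lo
--
-- def _main(N, K, query):
--     side = min(5000, max(max(a for a, b in query), max(b for a, b in query)))
--     best = 0
--     for a, _ in query:
--         cx = max(1, a - K)
--         if cx + K > side:
--             continue  # no window containing this point fits on the board
--         ys = sorted(b for x, b in query if cx <= x <= cx + K)
--         for b in ys:
--             cy = max(1, b - K)
--             cnt = _count_le(ys, cy + K) - _count_le(ys, cy - 1)
--             if cnt > best:
--                 best = cnt
--     return best
-- ===== Notes on version B (the rewrite author's own statement) =====
-- stated objective: faster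
-- what changed: Instead of materialising four MAX x MAX grids of 2-D prefix sums and scanning every anchor cell, B enumerates only the point-anchored candidate windows max(1, coord-K) that fit on the board and counts each x-strip's points per y-window with a sorted list and binary search; …
-- outside the precondition, e.g. on _main(0, 1, [(-1, 2), (2, 2)]): A returns 2, B returns 1; on _main(0, -2, [(2, 4), (1, 4)]): A returns 2, B returns 0
import Mathlib
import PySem

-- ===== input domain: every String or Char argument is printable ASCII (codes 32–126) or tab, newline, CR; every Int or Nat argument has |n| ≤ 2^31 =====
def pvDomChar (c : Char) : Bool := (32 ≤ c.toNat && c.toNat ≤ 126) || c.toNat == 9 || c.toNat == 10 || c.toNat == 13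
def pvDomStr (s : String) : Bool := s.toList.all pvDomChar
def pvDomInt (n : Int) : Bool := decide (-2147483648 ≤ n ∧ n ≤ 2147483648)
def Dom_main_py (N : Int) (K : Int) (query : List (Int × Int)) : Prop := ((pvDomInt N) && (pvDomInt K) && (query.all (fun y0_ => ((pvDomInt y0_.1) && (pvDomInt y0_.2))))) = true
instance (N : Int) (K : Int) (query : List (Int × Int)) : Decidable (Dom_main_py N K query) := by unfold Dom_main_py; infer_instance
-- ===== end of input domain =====

-- B replaces A's four MAX×MAX prefix-sum grids by a sweep over the point-derived candidate
-- anchors max(1, coord-K), counting each strip's points per y-window by binary search (faster).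

-- Python's max(...) on a nonempty iterable (both Pythons call it; Pre_ excludes the empty query).
def pyMaxInt (l : List Int) : Int := (PySem.List.max? l (fun y => y)).getD 0

-- ===== PORT A =====

-- itertools.accumulate with running sum s
def accumFrom (s : Int) : List Int → List Int
  | [] => []
  | x :: xs => (s + x) :: accumFrom (s + x) xs

-- Literal port of A. The try/except around the four cum_sum accesses is ported as the exact
-- validity test of Python's list indexing (-MAX ≤ idx ≤ MAX-1, an in-range negative index
-- wrapping to idx % MAX via PySem.Int.mod); the 'except: continue' leaves the entry 0.
def main_py (N : Int) (K : Int) (query : List (Int × Int)) : Int :=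
  let x_max := pyMaxInt (query.map Prod.fst)
  let y_max := pyMaxInt (query.map Prod.snd)
  let MAXi : Int := min 5000 (max x_max y_max) + 1
  let M : Nat := MAXi.toNat
  -- Python's grid[a][b] += 1 indexes with wrap-around: a negative index lands at a % MAX
  -- (exact for -MAX ≤ a ≤ MAX-1; on Pre_, where 0 ≤ a < MAX, this is a itself; PySem.Int.mod is Python's %)
  let grid : List (List Int) := query.foldl
      (fun g p => g.modify (PySem.Int.mod p.1 MAXi).toNat
        (fun row => row.modify (PySem.Int.mod p.2 MAXi).toNat (· + 1)))
      (List.replicate M (List.replicate M 0))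
  let row_sum := grid.map (fun row => accumFrom 0 row)
  let col_sum := (List.range M).map (fun j =>
      accumFrom 0 ((List.range M).map (fun i => ((row_sum.getD i []).getD j 0))))
  let cum_sum := (List.range M).map (fun i =>
      (List.range M).map (fun j => ((col_sum.getD j []).getD i 0)))
  let p_grid := (List.range M).map (fun (i : Nat) => (List.range M).map (fun (j : Nat) =>
      if 1 ≤ i ∧ 1 ≤ j ∧ (i:Int) + K < MAXi ∧ (j:Int) + K < MAXi
          ∧ -MAXi ≤ (i:Int) + K ∧ -MAXi ≤ (j:Int) + K then
        ((cum_sum.getD (i-1) []).getD (j-1) 0)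
          + ((cum_sum.getD (PySem.Int.mod ((i:Int)+K) MAXi).toNat []).getD (PySem.Int.mod ((j:Int)+K) MAXi).toNat 0)
          - ((cum_sum.getD (i-1) []).getD (PySem.Int.mod ((j:Int)+K) MAXi).toNat 0)
          - ((cum_sum.getD (PySem.Int.mod ((i:Int)+K) MAXi).toNat []).getD (j-1) 0)
      else 0))
  pyMaxInt (p_grid.map (fun row => pyMaxInt row))

-- ===== PORT B =====

-- Source B's _count_le is the textbook lo/hi bisect_right loop; PySem.List.bisectRight is that
-- exact loop (ported as the prelude's primitive for bisect_right).
def countLE (bs : List Int) (x : Int) : Nat := PySem.List.bisectRight bs x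

def main_py_alt (N : Int) (K : Int) (query : List (Int × Int)) : Int :=
  let side := min 5000 (max (pyMaxInt (query.map Prod.fst)) (pyMaxInt (query.map Prod.snd)))
  query.foldl (fun best p =>
    let cx := max 1 (p.1 - K)
    if cx + K > side then best  -- no window containing this point fits on the board
    else
      let ys := PySem.List.sorted
          ((query.filter (fun r => decide (cx ≤ r.1 ∧ r.1 ≤ cx + K))).map Prod.snd) (fun y => y)
      ys.foldl (fun best b =>
        let cy := max 1 (b - K)
        let cnt : Int := (countLE ys (cy + K) : Int) - (countLE ys (cy - 1) : Int)
        if cnt > best then cnt else best) best) 0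

-- ===== PRECONDITION & SPEC =====

-- the side of the grid A allocates: min(5000, max coordinate) + 1 (max taken with 0; under
-- the ∃-clause of Pre_ below this is A's MAX)
def boardMax (query : List (Int × Int)) : Int :=
  query.foldl (fun m p => max m (max p.1 p.2)) 0
def MAXpre (query : List (Int × Int)) : Int := min 5000 (boardMax query) + 1

-- Pre_ excludes the inputs on which A raises (empty query: ValueError; a coordinate above 5000
-- or below -MAX, or no nonnegative coordinate at all: IndexError) and, among the rest, admits a
-- negative coordinate or a negative window size only in the regimes where no window exists and
-- both programs return 0 (K = -1, K ≤ -2·MAX, K ≥ MAX-1); the remaining excluded inputs are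
-- exactly those whose value A produces through Python's accidental negative-index wrap-around
-- (a point or a window offset wrapping into an unrelated grid cell), which B does not reproduce.
def Pre_main_py (N : Int) (K : Int) (query : List (Int × Int)) : Prop :=
  query ≠ [] ∧ (∃ p ∈ query, 0 ≤ p.1 ∨ 0 ≤ p.2) ∧
    (∀ p ∈ query, p.1 ≤ 5000 ∧ p.2 ≤ 5000 ∧ -MAXpre query ≤ p.1 ∧ -MAXpre query ≤ p.2) ∧
    (K = -1 ∨ K ≤ -2 * MAXpre query ∨ MAXpre query ≤ K + 1 ∨
      (0 ≤ K ∧ ∀ p ∈ query, 0 ≤ p.1 ∧ 0 ≤ p.2))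
instance (N : Int) (K : Int) (query : List (Int × Int)) : Decidable (Pre_main_py N K query) := by
  unfold Pre_main_py; infer_instance

def pvWitness_main_py : Int × Int × (List (Int × Int)) := (0, 1, [(0, 0), (2, 2), (2, 1)])

def Spec_main_py (N : Int) (K : Int) (query : List (Int × Int)) (out : Int) : Prop :=
  out = main_py_alt N K query
instance (N : Int) (K : Int) (query : List (Int × Int)) (out : Int) :
    Decidable (Spec_main_py N K query out) := by unfold Spec_main_py; infer_instance

-- ===== CLAIM (what is proved, stated in full; the proofs are below) =====
def Claim_equal_main_py : Prop := ∀ (N : Int) (K : Int) (query : List (Int × Int)),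
  Dom_main_py N K query → Pre_main_py N K query → Spec_main_py N K query (main_py N K query)

-- ===== LEMMAS AND PROOFS =====

-- the window predicate and the two counting quantities both programs compute
def winP (K cx cy : Int) (p : Int × Int) : Bool :=
  decide (cx ≤ p.1 ∧ p.1 ≤ cx + K ∧ cy ≤ p.2 ∧ p.2 ≤ cy + K)
def cntW (q : List (Int × Int)) (K cx cy : Int) : Int := ((q.filter (winP K cx cy)).length : Int)
def cle (q : List (Int × Int)) (X Y : Int) : Int :=
  ((q.filter (fun p => decide (p.1 ≤ X ∧ p.2 ≤ Y))).length : Int)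

-- mirrors of the let-bound pieces of the ports (each equation with the port is definitional)
def MAXiOf (query : List (Int × Int)) : Int :=
  min 5000 (max (pyMaxInt (query.map Prod.fst)) (pyMaxInt (query.map Prod.snd))) + 1
def sideOf (query : List (Int × Int)) : Int :=
  min 5000 (max (pyMaxInt (query.map Prod.fst)) (pyMaxInt (query.map Prod.snd)))
def Mq (query : List (Int × Int)) : Nat := (MAXiOf query).toNat
-- the points as A's grid indexing stores them (the identity map on Pre_)
def WQ (query : List (Int × Int)) : List (Int × Int) :=
  query.map (fun p => (PySem.Int.mod p.1 (MAXiOf query), PySem.Int.mod p.2 (MAXiOf query)))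
def updG (g : List (List Int)) (p : Int × Int) : List (List Int) :=
  g.modify p.1.toNat (fun row => row.modify p.2.toNat (· + 1))
def gridOf (Mn : Nat) (q : List (Int × Int)) : List (List Int) :=
  q.foldl updG (List.replicate Mn (List.replicate Mn 0))
def rowSumG (g : List (List Int)) : List (List Int) :=
  g.map (fun row => accumFrom 0 row)
def colSumG (Mn : Nat) (g : List (List Int)) : List (List Int) :=
  (List.range Mn).map (fun j =>
      accumFrom 0 ((List.range Mn).map (fun i => (((rowSumG g).getD i []).getD j 0))))
def csG (Mn : Nat) (g : List (List Int)) (a b : Nat) : Int :=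
  (((colSumG Mn g).getD b []).getD a 0)
-- the validity condition of A's four cum_sum accesses, and its entry when valid
def entryA (Mi : Int) (q : List (Int × Int)) (K : Int) (i j : Nat) : Int :=
  if 1 ≤ i ∧ 1 ≤ j ∧ (i:Int) + K < Mi ∧ (j:Int) + K < Mi
      ∧ -Mi ≤ (i:Int) + K ∧ -Mi ≤ (j:Int) + K
  then cntW q K (i : Int) (j : Int) else 0

-- the inputs of the clean regime (windows may exist; all coordinates on the board)
def CleanQ (K : Int) (q : List (Int × Int)) : Prop :=
  q ≠ [] ∧ 0 ≤ K ∧ ∀ p ∈ q, 0 ≤ p.1 ∧ p.1 ≤ 5000 ∧ 0 ≤ p.2 ∧ p.2 ≤ 5000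

-- grid entry as a function
def Eg (g : List (List Int)) (a b : Nat) : Int := (g.getD a []).getD b 0

-- sum of f over range n
def SR (f : Nat → Int) (n : Nat) : Int := ((List.range n).map f).sum

lemma SR_succ (f : Nat → Int) (n : Nat) : SR f (n+1) = SR f n + f n := by
  simp [SR, List.range_succ]

lemma SR_congr {f g : Nat → Int} {n : Nat} (h : ∀ k < n, f k = g k) : SR f n = SR g n := by
  induction n with
  | zero => simp [SR]
  | succ m ih => rw [SR_succ, SR_succ, ih (fun k hk => h k (by omega)), h m (by omega)]

lemma SR_add (f g : Nat → Int) (n : Nat) :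
    SR (fun s => f s + g s) n = SR f n + SR g n := by
  induction n with
  | zero => simp [SR]
  | succ m ih => rw [SR_succ, SR_succ, SR_succ, ih]; ring

lemma SR_zero_fun (n : Nat) : SR (fun _ => (0:Int)) n = 0 := by
  induction n with
  | zero => simp [SR]
  | succ m ih => rw [SR_succ, ih]; simp

lemma SR_ind (v : Int) (c : Int) (n : Nat) :
    SR (fun s => if v = (s : Int) then c else 0) n = if 0 ≤ v ∧ v < (n : Int) then c else 0 := by
  induction n with
  | zero =>
      have h : ¬(0 ≤ v ∧ v < ((0:Nat) : Int)) := by omega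
      simp [SR, h]
  | succ m ih =>
      rw [SR_succ, ih]
      split_ifs <;> first | omega | simp | (exfalso; omega)
      all_goals omega

-- getD through List.modify
lemma getD_modify {α : Type} (l : List α) (i k : Nat) (f : α → α) (d : α) :
    (l.modify i f).getD k d = if i = k ∧ k < l.length then f (l.getD k d) else l.getD k d := by
  rw [List.getD_eq_getElem?_getD, List.getElem?_modify]
  cases hk : l[k]? with
  | none =>
      have hlen : ¬ k < l.length := by
        by_contra h
        rw [List.getElem?_eq_getElem h] at hk; cases hk
      rw [List.getD_eq_getElem?_getD, hk]
      simp [hlen]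
  | some a =>
      have hlen : k < l.length := by
        by_contra h
        rw [List.getElem?_eq_none_iff.mpr (by omega)] at hk; cases hk
      rw [List.getD_eq_getElem?_getD, hk]
      simp only [Option.map_some, Option.getD_some]
      split_ifs with h <;> simp_all

-- shape of the fold-built grid
lemma updG_shape (q : List (Int × Int)) : ∀ (g : List (List Int)),
    (q.foldl updG g).length = g.length ∧
    ∀ k, ((q.foldl updG g).getD k []).length = (g.getD k []).length := by
  induction q with
  | nil => intro g; exact ⟨rfl, fun _ => rfl⟩
  | cons p t ih =>
      intro g
      have h1 : (updG g p).length = g.length := List.length_modify _ _ _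
      have h2 : ∀ k, ((updG g p).getD k []).length = (g.getD k []).length := by
        intro k
        simp only [updG, List.getD_eq_getElem?_getD, List.getElem?_modify]
        cases hk : g[k]? with
        | none => rfl
        | some row =>
            simp only [Option.map_some, Option.getD_some]
            split_ifs <;> simp [List.length_modify]
      obtain ⟨ih1, ih2⟩ := ih (updG g p)
      exact ⟨by rw [List.foldl_cons, ih1, h1], fun k => by rw [List.foldl_cons, ih2 k, h2 k]⟩

lemma gridOf_len (Mn : Nat) (q : List (Int × Int)) : (gridOf Mn q).length = Mn := by
  simpa using (updG_shape q (List.replicate Mn (List.replicate Mn 0))).1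

lemma gridOf_row_len (Mn : Nat) (q : List (Int × Int)) (k : Nat) :
    ((gridOf Mn q).getD k []).length = if k < Mn then Mn else 0 := by
  have h := (updG_shape q (List.replicate Mn (List.replicate Mn 0))).2 k
  rw [gridOf, h, List.getD_eq_getElem?_getD, List.getElem?_replicate]
  split_ifs <;> simp_all

-- grid entries count the points
lemma gridOf_entry (Mn : Nat) (q : List (Int × Int))
    (hco : ∀ p ∈ q, 0 ≤ p.1 ∧ p.1 < (Mn : Int) ∧ 0 ≤ p.2 ∧ p.2 < (Mn : Int))
    (a b : Nat) (ha : a < Mn) (hb : b < Mn) :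
    Eg (gridOf Mn q) a b = (q.countP (fun p => decide (p.1 = (a:Int) ∧ p.2 = (b:Int))) : Int) := by
  have main : ∀ (l : List (Int × Int)) (g : List (List Int)),
      (∀ p ∈ l, 0 ≤ p.1 ∧ p.1 < (Mn : Int) ∧ 0 ≤ p.2 ∧ p.2 < (Mn : Int)) →
      g.length = Mn → (∀ k, (g.getD k []).length = if k < Mn then Mn else 0) →
      Eg (l.foldl updG g) a b
        = Eg g a b + (l.countP (fun p => decide (p.1 = (a:Int) ∧ p.2 = (b:Int))) : Int) := by
    intro l
    induction l with
    | nil => intro g _ _ _; simp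
    | cons p t ih =>
        intro g hco hlen hrow
        have hp := hco p (by simp)
        have hrowa : (g.getD a []).length = Mn := by rw [hrow a]; simp [ha]
        have hstep : Eg (updG g p) a b
            = Eg g a b + (if p.1 = (a:Int) ∧ p.2 = (b:Int) then 1 else 0) := by
          unfold Eg updG
          rw [getD_modify]
          by_cases hia : p.1.toNat = a ∧ a < g.length
          · rw [if_pos hia, getD_modify]
            by_cases hjb : p.2.toNat = b ∧ b < (g.getD a []).length
            · rw [if_pos hjb, if_pos (show p.1 = (a:Int) ∧ p.2 = (b:Int) by omega)]
            · rw [if_neg hjb, if_neg (show ¬(p.1 = (a:Int) ∧ p.2 = (b:Int)) by omega)]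
              simp
          · rw [if_neg hia, if_neg (show ¬(p.1 = (a:Int) ∧ p.2 = (b:Int)) by omega)]
            simp
        have hlen' : (updG g p).length = Mn := by
          rw [updG, List.length_modify]; exact hlen
        have hrow' : ∀ k, ((updG g p).getD k []).length = if k < Mn then Mn else 0 := by
          intro k
          have hk := hrow k
          rw [updG, getD_modify]
          by_cases h : p.1.toNat = k ∧ k < g.length
          · rw [if_pos h, List.length_modify, hk]
          · rw [if_neg h]; exact hk
        rw [List.foldl_cons, ih (updG g p) (fun r hr => hco r (by simp [hr])) hlen' hrow',
          hstep, List.countP_cons]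
        by_cases h : p.1 = (a:Int) ∧ p.2 = (b:Int)
        · rw [if_pos h]
          simp only [decide_eq_true_eq, if_pos h]
          push_cast; ring
        · rw [if_neg h]
          simp only [decide_eq_true_eq, if_neg h]
          push_cast; ring
  have hrow0 : ∀ k, ((List.replicate (Mn) (List.replicate (Mn) (0:Int))).getD k []).length
      = if k < Mn then Mn else 0 := by
    intro k
    rw [List.getD_eq_getElem?_getD, List.getElem?_replicate]
    split_ifs <;> simp_all
  have h0 : Eg (List.replicate (Mn) (List.replicate (Mn) (0:Int))) a b = 0 := by
    unfold Eg
    rw [List.getD_eq_getElem?_getD (l := List.replicate (Mn) (List.replicate (Mn) (0:Int))),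
      List.getElem?_replicate]
    split_ifs <;>
      simp [List.getD_eq_getElem?_getD, List.getElem?_replicate] <;> split_ifs <;> simp
  rw [gridOf, main q _ hco (by simp) hrow0, h0, zero_add]

lemma accumFrom_getD (l : List Int) : ∀ (s : Int) (k : Nat), k < l.length →
    (accumFrom s l).getD k 0 = s + (l.take (k+1)).sum := by
  induction l with
  | nil => intro s k hk; simp at hk
  | cons x xs ih =>
      intro s k hk
      cases k with
      | zero => simp [accumFrom]
      | succ m =>
          have := ih (s + x) m (by simpa using hk)
          simp only [accumFrom, List.getD_cons_succ, List.take_succ_cons, List.sum_cons]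
          rw [this]; ring

lemma take_sum_SR (l : List Int) : ∀ k, k ≤ l.length →
    (l.take k).sum = SR (fun t => l.getD t 0) k := by
  intro k hk
  induction k with
  | zero => simp [SR]
  | succ m ih =>
      rw [List.sum_take_succ l m (by omega), SR_succ, ih (by omega)]
      rw [List.getD_eq_getElem?_getD, List.getElem?_eq_getElem (by omega : m < l.length)]
      rfl

-- the double indicator sum collapses to the dominated-point count
lemma sum_cle (a b : Nat) : ∀ (l : List (Int × Int)), (∀ p ∈ l, 0 ≤ p.1 ∧ 0 ≤ p.2) →
    SR (fun s => SR (fun t =>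
        (l.countP (fun p => decide (p.1 = (s:Int) ∧ p.2 = (t:Int))) : Int)) (b+1)) (a+1)
      = cle l (a:Int) (b:Int) := by
  intro l
  induction l with
  | nil =>
      intro _
      rw [SR_congr (g := fun _ => (0:Int)) (fun s _ => by
          rw [SR_congr (g := fun _ => (0:Int)) (fun k _ => by simp), SR_zero_fun]),
        SR_zero_fun]
      simp [cle]
  | cons p t ih =>
      intro hco
      have hp := hco p (by simp)
      have hsplit : ∀ s : Nat, SR (fun tt => (((p :: t).countP
            (fun r => decide (r.1 = (s:Int) ∧ r.2 = (tt:Int)))) : Int)) (b+1)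
          = SR (fun tt => ((t.countP (fun r => decide (r.1 = (s:Int) ∧ r.2 = (tt:Int)))) : Int)) (b+1)
            + (if p.1 = (s:Int) ∧ 0 ≤ p.2 ∧ p.2 ≤ (b:Int) then (1:Int) else 0) := by
        intro s
        have hind : SR (fun tt => if p.1 = (s:Int) ∧ p.2 = (tt:Int) then (1:Int) else 0) (b+1)
            = if p.1 = (s:Int) ∧ 0 ≤ p.2 ∧ p.2 ≤ (b:Int) then (1:Int) else 0 := by
          by_cases h1 : p.1 = (s:Int)
          · rw [SR_congr (g := fun tt => if p.2 = ((tt:Nat):Int) then (1:Int) else 0)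
                (fun k _ => by simp [h1]), SR_ind]
            split_ifs <;> first | rfl | omega
          · rw [SR_congr (g := fun _ => (0:Int)) (fun k _ => by simp [h1]), SR_zero_fun,
              if_neg (by tauto)]
        rw [← hind, ← SR_add]
        apply SR_congr
        intro k _
        rw [List.countP_cons]
        simp only [decide_eq_true_eq]
        split_ifs <;> push_cast <;> ring
      rw [SR_congr (g := fun s => SR (fun tt => ((t.countP
            (fun r => decide (r.1 = (s:Int) ∧ r.2 = (tt:Int)))) : Int)) (b+1)
            + (if p.1 = (s:Int) ∧ 0 ≤ p.2 ∧ p.2 ≤ (b:Int) then (1:Int) else 0))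
          (fun s _ => hsplit s), SR_add, ih (fun r hr => hco r (by simp [hr]))]
      have houter : SR (fun s => if p.1 = ((s:Nat):Int) ∧ 0 ≤ p.2 ∧ p.2 ≤ (b:Int)
            then (1:Int) else 0) (a+1)
          = if 0 ≤ p.1 ∧ p.1 ≤ (a:Int) ∧ 0 ≤ p.2 ∧ p.2 ≤ (b:Int) then (1:Int) else 0 := by
        by_cases hQ : 0 ≤ p.2 ∧ p.2 ≤ (b:Int)
        · rw [SR_congr (g := fun s => if p.1 = ((s:Nat):Int) then (1:Int) else 0)
              (fun k _ => by simp [hQ]), SR_ind]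
          split_ifs <;> first | rfl | omega
        · rw [SR_congr (g := fun _ => (0:Int)) (fun k _ => by rw [if_neg (by tauto)]),
            SR_zero_fun, if_neg (by tauto)]
      rw [houter]
      simp only [cle, List.filter_cons, decide_eq_true_eq]
      split_ifs <;> (try simp only [List.length_cons]) <;> push_cast <;> omega

-- the 2-D cumulative sum counts dominated points
lemma csG_eq_cle (Mn : Nat) (q : List (Int × Int))
    (hco : ∀ p ∈ q, 0 ≤ p.1 ∧ p.1 < (Mn : Int) ∧ 0 ≤ p.2 ∧ p.2 < (Mn : Int))
    (a b : Nat) (ha : a < Mn) (hb : b < Mn) :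
    csG Mn (gridOf Mn q) a b = cle q (a : Int) (b : Int) := by
  have hgl := gridOf_len Mn q
  -- the j-th column list fed to accumulate
  have hcol : (colSumG Mn (gridOf Mn q)).getD b [] = accumFrom 0
      ((List.range Mn).map (fun i => (((rowSumG (gridOf Mn q)).getD i []).getD b 0))) := by
    rw [colSumG, PySem.List.getD_map_range _ _ _ _ hb]
  -- row prefix sums
  have hrow : ∀ s tt : Nat, s < Mn → tt < Mn →
      ((rowSumG (gridOf Mn q)).getD s []).getD tt 0 = SR (fun t2 => Eg (gridOf Mn q) s t2) (tt+1) := by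
    intro s tt hs htt
    have hrl : ((gridOf Mn q).getD s []).length = Mn := by
      rw [gridOf_row_len]; simp [hs]
    have : (rowSumG (gridOf Mn q)).getD s [] = accumFrom 0 ((gridOf Mn q).getD s []) := by
      rw [rowSumG, List.getD_eq_getElem?_getD, List.getElem?_map,
        List.getElem?_eq_getElem (by omega : s < (gridOf Mn q).length)]
      simp [List.getD_eq_getElem?_getD, List.getElem?_eq_getElem (by omega : s < (gridOf Mn q).length)]
    rw [this, accumFrom_getD _ _ _ (by omega), take_sum_SR _ _ (by omega), zero_add]
    apply SR_congr
    intro k _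
    rfl
  rw [csG, hcol, accumFrom_getD _ _ _ (by simpa using ha), take_sum_SR _ _ (by simpa using ha),
    zero_add]
  have h1 : SR (fun s => ((List.range Mn).map
        (fun i => (((rowSumG (gridOf Mn q)).getD i []).getD b 0))).getD s 0) (a+1)
      = SR (fun s => SR (fun t2 => Eg (gridOf Mn q) s t2) (b+1)) (a+1) := by
    apply SR_congr
    intro k hk
    rw [PySem.List.getD_map_range _ _ _ _ (by omega), hrow k b (by omega) hb]
  rw [h1]
  have h2 : SR (fun s => SR (fun t2 => Eg (gridOf Mn q) s t2) (b+1)) (a+1)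
      = SR (fun s => SR (fun t2 =>
          (q.countP (fun p => decide (p.1 = (s:Int) ∧ p.2 = (t2:Int))) : Int)) (b+1)) (a+1) := by
    apply SR_congr
    intro s hs
    apply SR_congr
    intro t2 ht2
    exact gridOf_entry Mn q hco s t2 (by omega) (by omega)
  rw [h2]
  exact sum_cle a b q (fun p hp => ⟨(hco p hp).1, (hco p hp).2.2.1⟩)

-- inclusion–exclusion, pointwise over the query list
lemma incl_excl (K cx cy : Int) (hK : 0 ≤ K) (q : List (Int × Int)) :
    cntW q K cx cy =
      cle q (cx+K) (cy+K) - cle q (cx-1) (cy+K) - cle q (cx+K) (cy-1) + cle q (cx-1) (cy-1) := by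
  induction q with
  | nil => norm_num [cntW, cle]
  | cons p t ih =>
      simp only [cntW, cle, winP, List.filter_cons, decide_eq_true_eq] at *
      split_ifs <;> (try simp only [List.length_cons]) <;> (try push_cast) <;> omega

-- extremum facts for Python max
lemma pyMaxInt_le {l : List Int} {x : Int} (hx : x ∈ l) : x ≤ pyMaxInt l := by
  cases l with
  | nil => exact absurd hx (List.not_mem_nil)
  | cons y t =>
      have hm := PySem.List.max?_id_cons y t
      have := PySem.List.max?_isMax hm x hx
      simpa [pyMaxInt, hm] using this

lemma pyMaxInt_mem {l : List Int} (h : l ≠ []) : pyMaxInt l ∈ l := by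
  cases l with
  | nil => exact absurd rfl h
  | cons y t =>
      have hm := PySem.List.max?_id_cons y t
      simpa [pyMaxInt, hm] using PySem.List.max?_mem hm

-- Python's % is the identity on an in-range nonnegative value
lemma modId {a b : Int} (h0 : 0 ≤ a) (h1 : a < b) : PySem.Int.mod a b = a := by
  rw [PySem.Int.mod_eq_emod_of_pos (by omega)]; exact Int.emod_eq_of_lt h0 h1

-- facts the clean regime gives: the grid side is positive, A's wrap-around indexing is the
-- identity on the points, and every coordinate lies inside the grid
lemma pre_facts {K : Int} {q : List (Int × Int)} (hpre : CleanQ K q) :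
    1 ≤ Mq q ∧ ((Mq q : Int) = MAXiOf q) ∧ WQ q = q ∧
      ∀ p ∈ q, 0 ≤ p.1 ∧ p.1 < (Mq q : Int) ∧ 0 ≤ p.2 ∧ p.2 < (Mq q : Int) := by
  obtain ⟨hne, hK, hco⟩ := hpre
  obtain ⟨px, hpx, hpx2⟩ := List.mem_map.mp
    (pyMaxInt_mem (by simpa using hne : q.map Prod.fst ≠ []))
  obtain ⟨py, hpy, hpy2⟩ := List.mem_map.mp
    (pyMaxInt_mem (by simpa using hne : q.map Prod.snd ≠ []))
  have hbx := hco px hpx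
  have hby := hco py hpy
  have hM1 : 1 ≤ MAXiOf q := by rw [MAXiOf]; omega
  have hMle : MAXiOf q ≤ 5001 := by rw [MAXiOf]; omega
  have hMq : (Mq q : Int) = MAXiOf q := by rw [Mq]; omega
  have hin : ∀ p ∈ q, 0 ≤ p.1 ∧ p.1 < MAXiOf q ∧ 0 ≤ p.2 ∧ p.2 < MAXiOf q := by
    intro p hp
    have hb := hco p hp
    have h1 : p.1 ≤ pyMaxInt (q.map Prod.fst) := pyMaxInt_le (List.mem_map.mpr ⟨p, hp, rfl⟩)
    have h2 : p.2 ≤ pyMaxInt (q.map Prod.snd) := pyMaxInt_le (List.mem_map.mpr ⟨p, hp, rfl⟩)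
    rw [MAXiOf]
    omega
  refine ⟨by omega, hMq, ?_, fun p hp => by have := hin p hp; omega⟩
  rw [WQ]
  have : ∀ p ∈ q, (PySem.Int.mod p.1 (MAXiOf q), PySem.Int.mod p.2 (MAXiOf q)) = p := by
    intro p hp
    have hb := hin p hp
    have e1 : PySem.Int.mod p.1 (MAXiOf q) = p.1 := modId (by omega) (by omega)
    have e2 : PySem.Int.mod p.2 (MAXiOf q) = p.2 := modId (by omega) (by omega)
    rw [e1, e2]
  calc q.map (fun p => (PySem.Int.mod p.1 (MAXiOf q), PySem.Int.mod p.2 (MAXiOf q)))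
      = q.map id := List.map_congr_left (fun p hp => this p hp)
    _ = q := List.map_id q

-- the transposed cumulative grid of the port
def cumG (Mn : Nat) (g : List (List Int)) : List (List Int) :=
  (List.range Mn).map (fun i =>
    (List.range Mn).map (fun j => (((colSumG Mn g).getD j []).getD i 0)))

lemma cumG_getD (Mn : Nat) (g : List (List Int)) (a b : Nat) (ha : a < Mn) (hb : b < Mn) :
    ((cumG Mn g).getD a []).getD b 0 = csG Mn g a b := by
  rw [cumG, PySem.List.getD_map_range _ _ _ _ ha, PySem.List.getD_map_range _ _ _ _ hb, csG]

-- A's pipeline produces exactly the window counts at each anchor (clean regime)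
lemma A_shape {N K : Int} {q : List (Int × Int)} (hpre : CleanQ K q) :
    main_py N K q = pyMaxInt (((List.range (Mq q)).map (fun i =>
      pyMaxInt ((List.range (Mq q)).map (fun j => entryA (MAXiOf q) q K i j))))) := by
  obtain ⟨hM1, hMq, hWQ, hco⟩ := pre_facts hpre
  have hK := hpre.2.1
  have hPG : (q.foldl (fun g p => g.modify (PySem.Int.mod p.1 (MAXiOf q)).toNat
        (fun row => row.modify (PySem.Int.mod p.2 (MAXiOf q)).toNat (· + 1)))
        (List.replicate (Mq q) (List.replicate (Mq q) (0:Int)))) = gridOf (Mq q) (WQ q) := by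
    rw [gridOf, WQ, List.foldl_map]
    rfl
  rw [hWQ] at hPG
  have h0 : main_py N K q = pyMaxInt (((List.range (Mq q)).map (fun (i : Nat) =>
      (List.range (Mq q)).map (fun (j : Nat) =>
        if 1 ≤ i ∧ 1 ≤ j ∧ (i:Int) + K < MAXiOf q ∧ (j:Int) + K < MAXiOf q
            ∧ -(MAXiOf q) ≤ (i:Int) + K ∧ -(MAXiOf q) ≤ (j:Int) + K then
          ((cumG (Mq q) (gridOf (Mq q) q)).getD (i-1) []).getD (j-1) 0
            + ((cumG (Mq q) (gridOf (Mq q) q)).getD (PySem.Int.mod ((i:Int)+K) (MAXiOf q)).toNat []).getD (PySem.Int.mod ((j:Int)+K) (MAXiOf q)).toNat 0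
            - ((cumG (Mq q) (gridOf (Mq q) q)).getD (i-1) []).getD (PySem.Int.mod ((j:Int)+K) (MAXiOf q)).toNat 0
            - ((cumG (Mq q) (gridOf (Mq q) q)).getD (PySem.Int.mod ((i:Int)+K) (MAXiOf q)).toNat []).getD (j-1) 0
        else 0))).map (fun row => pyMaxInt row)) := by
    rw [← hPG]
    rfl
  rw [h0, List.map_map]
  apply congrArg pyMaxInt
  apply List.map_congr_left
  intro i hi
  have hi' : i < Mq q := List.mem_range.mp hi
  simp only [Function.comp_apply]
  apply congrArg pyMaxInt
  apply List.map_congr_left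
  intro j hj
  have hj' : j < Mq q := List.mem_range.mp hj
  rw [entryA]
  by_cases hv : 1 ≤ i ∧ 1 ≤ j ∧ (i:Int) + K < MAXiOf q ∧ (j:Int) + K < MAXiOf q
      ∧ -(MAXiOf q) ≤ (i:Int) + K ∧ -(MAXiOf q) ≤ (j:Int) + K
  · rw [if_pos hv, if_pos hv]
    have emi : (PySem.Int.mod ((i:Int)+K) (MAXiOf q)).toNat = i + K.toNat := by
      rw [modId (a := (i:Int)+K) (b := MAXiOf q) (by omega) (by omega)]; omega
    have emj : (PySem.Int.mod ((j:Int)+K) (MAXiOf q)).toNat = j + K.toNat := by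
      rw [modId (a := (j:Int)+K) (b := MAXiOf q) (by omega) (by omega)]; omega
    rw [emi, emj]
    rw [cumG_getD _ _ _ _ (by omega) (by omega), cumG_getD _ _ _ _ (by omega) (by omega),
      cumG_getD _ _ _ _ (by omega) (by omega), cumG_getD _ _ _ _ (by omega) (by omega),
      csG_eq_cle _ _ hco _ _ (by omega) (by omega), csG_eq_cle _ _ hco _ _ (by omega) (by omega),
      csG_eq_cle _ _ hco _ _ (by omega) (by omega), csG_eq_cle _ _ hco _ _ (by omega) (by omega)]
    have e1 : ((i - 1 : Nat) : Int) = (i:Int) - 1 := by omega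
    have e2 : ((j - 1 : Nat) : Int) = (j:Int) - 1 := by omega
    have e3 : ((i + K.toNat : Nat) : Int) = (i:Int) + K := by omega
    have e4 : ((j + K.toNat : Nat) : Int) = (j:Int) + K := by omega
    rw [e1, e2, e3, e4, incl_excl K (i:Int) (j:Int) hK q]
    ring
  · rw [if_neg hv, if_neg hv]

lemma A_ge_zero {N K : Int} {q : List (Int × Int)} (hpre : CleanQ K q) :
    0 ≤ main_py N K q := by
  obtain ⟨hM1, hMq, hWQ, hco⟩ := pre_facts hpre
  rw [A_shape hpre]
  have h00 : entryA (MAXiOf q) q K 0 0 = 0 := by simp [entryA]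
  have hmem0 : (0:Nat) ∈ List.range (Mq q) := List.mem_range.mpr (by omega)
  have h1 : entryA (MAXiOf q) q K 0 0
      ∈ (List.range (Mq q)).map (fun j => entryA (MAXiOf q) q K 0 j) :=
    List.mem_map.mpr ⟨0, hmem0, rfl⟩
  have h2 : pyMaxInt ((List.range (Mq q)).map (fun j => entryA (MAXiOf q) q K 0 j))
      ∈ (List.range (Mq q)).map (fun i =>
          pyMaxInt ((List.range (Mq q)).map (fun j => entryA (MAXiOf q) q K i j))) :=
    List.mem_map.mpr ⟨0, hmem0, rfl⟩
  have := pyMaxInt_le h1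
  have := pyMaxInt_le h2
  omega

lemma A_ge_cnt (N : Int) {K : Int} {q : List (Int × Int)} (hpre : CleanQ K q)
    (i j : Nat) (hv : 1 ≤ i ∧ 1 ≤ j ∧ (i:Int) + K < MAXiOf q ∧ (j:Int) + K < MAXiOf q
      ∧ -(MAXiOf q) ≤ (i:Int) + K ∧ -(MAXiOf q) ≤ (j:Int) + K) :
    cntW q K (i : Int) (j : Int) ≤ main_py N K q := by
  obtain ⟨hM1, hMq, hWQ, hco⟩ := pre_facts hpre
  have hK := hpre.2.1
  rw [A_shape hpre]
  have hi : i ∈ List.range (Mq q) := List.mem_range.mpr (by omega)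
  have hj : j ∈ List.range (Mq q) := List.mem_range.mpr (by omega)
  have hev : entryA (MAXiOf q) q K i j = cntW q K (i : Int) (j : Int) := by
    rw [entryA, if_pos hv]
  have h1 : entryA (MAXiOf q) q K i j
      ∈ (List.range (Mq q)).map (fun j => entryA (MAXiOf q) q K i j) :=
    List.mem_map.mpr ⟨j, hj, rfl⟩
  have h2 : pyMaxInt ((List.range (Mq q)).map (fun j => entryA (MAXiOf q) q K i j))
      ∈ (List.range (Mq q)).map (fun i =>
          pyMaxInt ((List.range (Mq q)).map (fun j => entryA (MAXiOf q) q K i j))) :=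
    List.mem_map.mpr ⟨i, hi, rfl⟩
  have := pyMaxInt_le h1
  have := pyMaxInt_le h2
  omega

lemma A_cases (N : Int) {K : Int} {q : List (Int × Int)} (hpre : CleanQ K q) :
    main_py N K q = 0 ∨ ∃ i j : Nat,
      (1 ≤ i ∧ 1 ≤ j ∧ (i:Int) + K < MAXiOf q ∧ (j:Int) + K < MAXiOf q
        ∧ -(MAXiOf q) ≤ (i:Int) + K ∧ -(MAXiOf q) ≤ (j:Int) + K) ∧
      main_py N K q = cntW q K (i : Int) (j : Int) := by
  obtain ⟨hM1, hMq, hWQ, hco⟩ := pre_facts hpre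
  rw [A_shape hpre]
  have hne : (List.range (Mq q)).map (fun i =>
      pyMaxInt ((List.range (Mq q)).map (fun j => entryA (MAXiOf q) q K i j))) ≠ [] := by
    apply List.ne_nil_of_length_pos
    simpa using hM1
  obtain ⟨i, hi, hieq⟩ := List.mem_map.mp (pyMaxInt_mem hne)
  have hne2 : (List.range (Mq q)).map (fun j => entryA (MAXiOf q) q K i j) ≠ [] := by
    apply List.ne_nil_of_length_pos
    simpa using hM1
  obtain ⟨j, hj, hjeq⟩ := List.mem_map.mp (pyMaxInt_mem hne2)
  rw [← hieq, ← hjeq, entryA]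
  by_cases hv : 1 ≤ i ∧ 1 ≤ j ∧ (i:Int) + K < MAXiOf q ∧ (j:Int) + K < MAXiOf q
      ∧ -(MAXiOf q) ≤ (i:Int) + K ∧ -(MAXiOf q) ≤ (j:Int) + K
  · right
    exact ⟨i, j, hv, by rw [if_pos hv]⟩
  · left
    rw [if_neg hv]


-- ===== the zero regimes (no window exists; both programs return 0) =====

-- mirrors of the port's let-chain (each definitionally equal to the port's term)
def rawGrid (q : List (Int × Int)) : List (List Int) :=
  q.foldl (fun g p => g.modify (PySem.Int.mod p.1 (MAXiOf q)).toNat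
      (fun row => row.modify (PySem.Int.mod p.2 (MAXiOf q)).toNat (· + 1)))
    (List.replicate (Mq q) (List.replicate (Mq q) 0))
def rawCum (q : List (Int × Int)) : List (List Int) := cumG (Mq q) (rawGrid q)
def rawEntry (q : List (Int × Int)) (K : Int) (i j : Nat) : Int :=
  if 1 ≤ i ∧ 1 ≤ j ∧ (i:Int) + K < MAXiOf q ∧ (j:Int) + K < MAXiOf q
      ∧ -(MAXiOf q) ≤ (i:Int) + K ∧ -(MAXiOf q) ≤ (j:Int) + K then
    ((rawCum q).getD (i-1) []).getD (j-1) 0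
      + ((rawCum q).getD (PySem.Int.mod ((i:Int)+K) (MAXiOf q)).toNat []).getD (PySem.Int.mod ((j:Int)+K) (MAXiOf q)).toNat 0
      - ((rawCum q).getD (i-1) []).getD (PySem.Int.mod ((j:Int)+K) (MAXiOf q)).toNat 0
      - ((rawCum q).getD (PySem.Int.mod ((i:Int)+K) (MAXiOf q)).toNat []).getD (j-1) 0
  else 0

lemma main_py_shape (N K : Int) (q : List (Int × Int)) :
    main_py N K q = pyMaxInt (((List.range (Mq q)).map (fun i =>
      (List.range (Mq q)).map (fun j => rawEntry q K i j))).map (fun row => pyMaxInt row)) := rfl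

lemma pyMaxInt_all_zero {l : List Int} (h : ∀ x ∈ l, x = 0) : pyMaxInt l = 0 := by
  rcases eq_or_ne l [] with rfl | hne
  · rfl
  · exact h _ (pyMaxInt_mem hne)

lemma A_zero_all {N K : Int} {q : List (Int × Int)}
    (h : ∀ i j, i < Mq q → j < Mq q → rawEntry q K i j = 0) : main_py N K q = 0 := by
  rw [main_py_shape, List.map_map]
  apply pyMaxInt_all_zero
  intro x hx
  obtain ⟨i, hi, rfl⟩ := List.mem_map.mp hx
  simp only [Function.comp_apply]
  apply pyMaxInt_all_zero
  intro y hy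
  obtain ⟨j, hj, rfl⟩ := List.mem_map.mp hy
  exact h i j (List.mem_range.mp hi) (List.mem_range.mp hj)

-- K ≥ MAX-1: every window overruns the right end of cum_sum (IndexError, entry stays 0)
lemma A_zero_bigK {N K : Int} {q : List (Int × Int)}
    (hbig : MAXiOf q ≤ K + 1) : main_py N K q = 0 :=
  A_zero_all (fun i j _ _ => by
    rw [rawEntry, if_neg]
    rintro ⟨h1, -, h3, -⟩
    omega)

-- K ≤ -2·MAX: every window underruns the left end of cum_sum (IndexError, entry stays 0)
lemma A_zero_negbig {N K : Int} {q : List (Int × Int)} (hMq : (Mq q : Int) = MAXiOf q)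
    (hneg : K ≤ -2 * MAXiOf q) : main_py N K q = 0 :=
  A_zero_all (fun i j hi _ => by
    rw [rawEntry, if_neg]
    rintro ⟨-, -, -, -, h5, -⟩
    have : (i:Int) < MAXiOf q := by omega
    omega)

-- K = -1: the four cum_sum corners coincide and every entry cancels to 0
lemma A_zero_negone {N : Int} {q : List (Int × Int)} (hMq : (Mq q : Int) = MAXiOf q) :
    main_py N (-1) q = 0 :=
  A_zero_all (fun i j hi hj => by
    rw [rawEntry]
    by_cases hv : 1 ≤ i ∧ 1 ≤ j ∧ (i:Int) + (-1) < MAXiOf q ∧ (j:Int) + (-1) < MAXiOf q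
        ∧ -(MAXiOf q) ≤ (i:Int) + (-1) ∧ -(MAXiOf q) ≤ (j:Int) + (-1)
    · rw [if_pos hv]
      have emi : (PySem.Int.mod ((i:Int)+(-1)) (MAXiOf q)).toNat = i - 1 := by
        rw [modId (a := (i:Int)+(-1)) (b := MAXiOf q) (by omega) (by omega)]; omega
      have emj : (PySem.Int.mod ((j:Int)+(-1)) (MAXiOf q)).toNat = j - 1 := by
        rw [modId (a := (j:Int)+(-1)) (b := MAXiOf q) (by omega) (by omega)]; omega
      rw [emi, emj]
      ring
    · rw [if_neg hv])

-- the fold in MAXpre is an exact maximum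
lemma boardMax_fold (q : List (Int × Int)) : ∀ m : Int,
    m ≤ q.foldl (fun m p => max m (max p.1 p.2)) m ∧
    (∀ p ∈ q, p.1 ≤ q.foldl (fun m p => max m (max p.1 p.2)) m ∧
      p.2 ≤ q.foldl (fun m p => max m (max p.1 p.2)) m) ∧
    (q.foldl (fun m p => max m (max p.1 p.2)) m = m ∨
      ∃ p ∈ q, q.foldl (fun m p => max m (max p.1 p.2)) m = p.1 ∨
        q.foldl (fun m p => max m (max p.1 p.2)) m = p.2) := by
  intro m
  induction q generalizing m with
  | nil => exact ⟨le_refl _, by simp, Or.inl rfl⟩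
  | cons p t ih =>
      simp only [List.foldl_cons]
      obtain ⟨ih1, ih2, ih3⟩ := ih (max m (max p.1 p.2))
      refine ⟨by omega, ?_, ?_⟩
      · intro r hr
        rcases List.mem_cons.mp hr with rfl | h
        · exact ⟨le_trans (le_trans (le_max_left r.1 r.2) (le_max_right m (max r.1 r.2))) ih1,
            le_trans (le_trans (le_max_right r.1 r.2) (le_max_right m (max r.1 r.2))) ih1⟩
        · exact ih2 r h
      · rcases ih3 with h | ⟨r, hr, h⟩
        · rcases max_choice m (max p.1 p.2) with hmx | hmx
          · exact Or.inl (by rw [h, hmx])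
          · rcases max_choice p.1 p.2 with hxy | hxy
            · exact Or.inr ⟨p, by simp, Or.inl (by rw [h, hmx, hxy])⟩
            · exact Or.inr ⟨p, by simp, Or.inr (by rw [h, hmx, hxy])⟩
        · exact Or.inr ⟨r, by simp [hr], h⟩

-- under Pre_'s nonempty/∃-clauses the fold-based MAXpre is A's MAX
lemma MAXpre_eq {q : List (Int × Int)} (hne : q ≠ [])
    (hex : ∃ p ∈ q, 0 ≤ p.1 ∨ 0 ≤ p.2) : MAXpre q = MAXiOf q := by
  obtain ⟨px, hpx, hpxe⟩ := List.mem_map.mp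
    (pyMaxInt_mem (show q.map Prod.fst ≠ [] by simpa using hne))
  obtain ⟨py, hpy, hpye⟩ := List.mem_map.mp
    (pyMaxInt_mem (show q.map Prod.snd ≠ [] by simpa using hne))
  obtain ⟨e, he, hes⟩ := hex
  have he1 : e.1 ≤ pyMaxInt (q.map Prod.fst) := pyMaxInt_le (List.mem_map.mpr ⟨e, he, rfl⟩)
  have he2 : e.2 ≤ pyMaxInt (q.map Prod.snd) := pyMaxInt_le (List.mem_map.mpr ⟨e, he, rfl⟩)
  have hbm : q.foldl (fun m p => max m (max p.1 p.2)) 0 = boardMax q := rfl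
  obtain ⟨hf1, hf2, hf3⟩ := boardMax_fold q 0
  rw [hbm] at hf1 hf3
  simp only [hbm] at hf2
  have hub1 : px.1 ≤ boardMax q := (hf2 px hpx).1
  have hub2 : py.2 ≤ boardMax q := (hf2 py hpy).2
  have hle : boardMax q ≤ max (pyMaxInt (q.map Prod.fst)) (pyMaxInt (q.map Prod.snd)) := by
    rcases hf3 with h0 | ⟨r, hr, h⟩
    · omega
    · have hr1 : r.1 ≤ pyMaxInt (q.map Prod.fst) := pyMaxInt_le (List.mem_map.mpr ⟨r, hr, rfl⟩)
      have hr2 : r.2 ≤ pyMaxInt (q.map Prod.snd) := pyMaxInt_le (List.mem_map.mpr ⟨r, hr, rfl⟩)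
      omega
  rw [MAXpre, MAXiOf]
  omega

-- ===== B-side characterization =====

def cxOf (K a : Int) : Int := max 1 (a - K)
def bsOf (q : List (Int × Int)) (K cx : Int) : List Int :=
  PySem.List.sorted ((q.filter (fun r => decide (cx ≤ r.1 ∧ r.1 ≤ cx + K))).map Prod.snd) (fun y => y)
def innerVal (q : List (Int × Int)) (K cx b : Int) : Int :=
  (countLE (bsOf q K cx) (cxOf K b + K) : Int) - (countLE (bsOf q K cx) (cxOf K b - 1) : Int)

-- K < 0: every strip interval [cx, cx+K] is empty, B's inner loop never runs, B returns 0
lemma B_zero_negK {N K : Int} {q : List (Int × Int)} (hK : K < 0) :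
    main_py_alt N K q = 0 := by
  have h0 : main_py_alt N K q = q.foldl (fun best p =>
      if cxOf K p.1 + K > sideOf q then best
      else (bsOf q K (cxOf K p.1)).foldl (fun best b =>
        if innerVal q K (cxOf K p.1) b > best
        then innerVal q K (cxOf K p.1) b else best) best) 0 := rfl
  rw [h0]
  have h1 : q.foldl (fun best p =>
      if cxOf K p.1 + K > sideOf q then best
      else (bsOf q K (cxOf K p.1)).foldl (fun best b =>
        if innerVal q K (cxOf K p.1) b > best
        then innerVal q K (cxOf K p.1) b else best) best) 0
      = q.foldl (fun (best : Int) _ => best) 0 := by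
    apply PySem.List.foldl_congr_mem
    intro acc p _
    have hnil : bsOf q K (cxOf K p.1) = [] := by
      rw [bsOf]
      have hf : q.filter (fun r => decide (cxOf K p.1 ≤ r.1 ∧ r.1 ≤ cxOf K p.1 + K)) = [] := by
        apply List.filter_eq_nil_iff.mpr
        intro r _
        simp only [decide_eq_true_eq, not_and, not_le]
        intro h
        omega
      rw [hf]
      simp only [List.map_nil]
      exact (PySem.List.sorted_perm _ _ _).eq_nil
    rw [hnil]
    split_ifs <;> rfl
  rw [h1]
  exact List.foldl_fixed' (fun _ => rfl) q


-- when no (K+1)-wide window fits on the board every point is skipped and B returns 0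
lemma B_zero {N K : Int} {q : List (Int × Int)}
    (hbig : ∀ p ∈ q, cxOf K p.1 + K > sideOf q) :
    main_py_alt N K q = 0 := by
  have h0 : main_py_alt N K q = q.foldl (fun best p =>
      if cxOf K p.1 + K > sideOf q then best
      else (bsOf q K (cxOf K p.1)).foldl (fun best b =>
        if innerVal q K (cxOf K p.1) b > best
        then innerVal q K (cxOf K p.1) b else best) best) 0 := rfl
  rw [h0]
  have h1 : q.foldl (fun best p =>
      if cxOf K p.1 + K > sideOf q then best
      else (bsOf q K (cxOf K p.1)).foldl (fun best b =>
        if innerVal q K (cxOf K p.1) b > best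
        then innerVal q K (cxOf K p.1) b else best) best) 0
      = q.foldl (fun (best : Int) _ => best) 0 := by
    apply PySem.List.foldl_congr_mem
    intro acc p hp
    rw [if_pos (hbig p hp)]
  rw [h1]
  exact List.foldl_fixed' (fun _ => rfl) q

-- when windows fit for every point, B's loop is a running maximum over candidate anchor pairs
lemma B_shape {N K : Int} {q : List (Int × Int)}
    (hfit : ∀ p ∈ q, ¬ (cxOf K p.1 + K > sideOf q)) :
    main_py_alt N K q = q.foldl (fun best p =>
      (bsOf q K (cxOf K p.1)).foldl (fun best b =>
        max best (innerVal q K (cxOf K p.1) b)) best) 0 := by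
  have h0 : main_py_alt N K q = q.foldl (fun best p =>
      if cxOf K p.1 + K > sideOf q then best
      else (bsOf q K (cxOf K p.1)).foldl (fun best b =>
        if innerVal q K (cxOf K p.1) b > best
        then innerVal q K (cxOf K p.1) b else best) best) 0 := rfl
  rw [h0]
  apply PySem.List.foldl_congr_mem
  intro acc p hp
  rw [if_neg (hfit p hp)]
  apply PySem.List.foldl_congr_mem
  intro acc2 b _
  split_ifs <;> omega

-- bisect_right on a sorted list counts the elements ≤ x
lemma countLE_sorted {bs : List Int} (hs : List.Pairwise (· ≤ ·) bs) (x : Int) :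
    (countLE bs x : Int) = ((bs.filter (fun v => decide (v ≤ x))).length : Int) := by
  obtain ⟨hle, hlt, hgt⟩ := PySem.List.bisectRight_spec bs x hs
  rw [countLE]
  set r := PySem.List.bisectRight bs x with hr
  have hsplit : bs.filter (fun v => decide (v ≤ x))
      = (bs.take r).filter (fun v => decide (v ≤ x)) ++ (bs.drop r).filter (fun v => decide (v ≤ x)) := by
    rw [← List.filter_append, List.take_append_drop]
  have h1 : (bs.take r).filter (fun v => decide (v ≤ x)) = bs.take r := by
    rw [List.filter_eq_self]
    intro a ha
    obtain ⟨k, hk, hke⟩ := List.mem_iff_getElem.mp ha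
    have hk' : k < bs.length := by
      have := List.length_take (i := r) (l := bs); omega
    rw [List.getElem_take] at hke
    have : bs[k] ≤ x := hlt k hk' (by
      have := List.length_take (i := r) (l := bs); omega)
    simp [← hke, this]
  have h2 : (bs.drop r).filter (fun v => decide (v ≤ x)) = [] := by
    rw [List.filter_eq_nil_iff]
    intro a ha
    obtain ⟨k, hk, hke⟩ := List.mem_iff_getElem.mp ha
    rw [List.getElem_drop] at hke
    have hk' : r + k < bs.length := by
      have := List.length_drop (i := r) (l := bs); omega
    have : x < bs[r + k] := hgt (r + k) hk' (by omega)
    simp [← hke]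
    omega
  rw [hsplit, h1, h2, List.append_nil, List.length_take]
  omega

lemma filter_le_sub (l : List Int) (X Y : Int) (h : Y ≤ X) :
    ((l.filter (fun v => decide (v ≤ X))).length : Int)
      - ((l.filter (fun v => decide (v ≤ Y))).length : Int)
      = ((l.filter (fun v => decide (Y < v ∧ v ≤ X))).length : Int) := by
  induction l with
  | nil => simp
  | cons x xs ih =>
      simp only [List.filter_cons, decide_eq_true_eq]
      split_ifs <;> (try simp only [List.length_cons]) <;> (try push_cast) <;> omega

-- the inner loop body computes exactly the window count at the candidate anchor
lemma innerVal_eq_cntW (q : List (Int × Int)) (K cx b : Int) (hK : 0 ≤ K) :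
    innerVal q K cx b = cntW q K cx (cxOf K b) := by
  set cy := cxOf K b with hcy
  set strip := q.filter (fun r => decide (cx ≤ r.1 ∧ r.1 ≤ cx + K)) with hstrip
  set bs := bsOf q K cx with hbs
  have hsorted : List.Pairwise (· ≤ ·) bs := by
    rw [List.pairwise_iff_getElem]
    intro i j hi hj hij
    exact PySem.List.key_sorted_getElem_mono (strip.map Prod.snd) (fun y => y) (by omega) hj
  rw [innerVal, ← hbs, ← hcy, countLE_sorted hsorted, countLE_sorted hsorted,
    filter_le_sub _ _ _ (by omega)]
  have hperm : bs.Perm (strip.map Prod.snd) := PySem.List.sorted_perm _ _ _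
  have hlen : (bs.filter (fun v => decide (cy - 1 < v ∧ v ≤ cy + K))).length
      = ((strip.map Prod.snd).filter (fun v => decide (cy - 1 < v ∧ v ≤ cy + K))).length :=
    (hperm.filter _).length_eq
  rw [hlen, List.filter_map, List.length_map, List.filter_filter]
  rw [cntW]
  congr 1
  apply congrArg List.length
  apply List.filter_congr
  intro r _
  simp only [Function.comp_apply]
  rw [winP, ← Bool.decide_and, decide_eq_decide]
  constructor
  · rintro ⟨⟨h1, h2⟩, h3, h4⟩; exact ⟨h3, h4, by omega, h2⟩
  · rintro ⟨h1, h2, h3, h4⟩; exact ⟨⟨by omega, h4⟩, h1, h2⟩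

lemma B_props (N : Int) {K : Int} {q : List (Int × Int)} (hK : 0 ≤ K)
    (hfit : ∀ p ∈ q, ¬ (cxOf K p.1 + K > sideOf q)) :
    0 ≤ main_py_alt N K q ∧
    (∀ p ∈ q, ∀ b ∈ bsOf q K (cxOf K p.1),
        cntW q K (cxOf K p.1) (cxOf K b) ≤ main_py_alt N K q) ∧
    (main_py_alt N K q = 0 ∨ ∃ p ∈ q, ∃ b ∈ bsOf q K (cxOf K p.1),
        main_py_alt N K q = cntW q K (cxOf K p.1) (cxOf K b)) := by
  -- generic facts about the nested running maximum
  have gen : ∀ (l : List (Int × Int)) (a : Int),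
      a ≤ l.foldl (fun best p =>
          (bsOf q K (cxOf K p.1)).foldl (fun best b => max best (innerVal q K (cxOf K p.1) b)) best) a ∧
      (∀ p ∈ l, ∀ b ∈ bsOf q K (cxOf K p.1), innerVal q K (cxOf K p.1) b ≤
        l.foldl (fun best p =>
          (bsOf q K (cxOf K p.1)).foldl (fun best b => max best (innerVal q K (cxOf K p.1) b)) best) a) ∧
      (l.foldl (fun best p =>
          (bsOf q K (cxOf K p.1)).foldl (fun best b => max best (innerVal q K (cxOf K p.1) b)) best) a = a ∨
       ∃ p ∈ l, ∃ b ∈ bsOf q K (cxOf K p.1),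
        l.foldl (fun best p =>
          (bsOf q K (cxOf K p.1)).foldl (fun best b => max best (innerVal q K (cxOf K p.1) b)) best) a
          = innerVal q K (cxOf K p.1) b) := by
    intro l
    induction l with
    | nil => intro a; exact ⟨le_refl _, by simp, Or.inl rfl⟩
    | cons p t ih =>
        intro a
        simp only [List.foldl_cons]
        set a' := (bsOf q K (cxOf K p.1)).foldl
            (fun best b => max best (innerVal q K (cxOf K p.1) b)) a with ha'
        have hinner := PySem.List.le_foldl_max_int (bsOf q K (cxOf K p.1))
            (fun b => innerVal q K (cxOf K p.1) b) a
        have hmem : a' = a ∨ ∃ b ∈ bsOf q K (cxOf K p.1), a' = innerVal q K (cxOf K p.1) b := by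
          have hmap : a' = ((bsOf q K (cxOf K p.1)).map
              (fun b => innerVal q K (cxOf K p.1) b)).foldl max a := by
            rw [List.foldl_map]
          rcases PySem.List.foldl_max_mem ((bsOf q K (cxOf K p.1)).map
              (fun b => innerVal q K (cxOf K p.1) b)) a with h | h
          · left; rw [hmap, h]
          · right
            obtain ⟨b, hb, hbe⟩ := List.mem_map.mp h
            exact ⟨b, hb, by rw [hmap, ← hbe]⟩
        obtain ⟨ih1, ih2, ih3⟩ := ih a'
        refine ⟨le_trans hinner.1 ih1, ?_, ?_⟩
        · intro r hr b hb
          rcases List.mem_cons.mp hr with h | h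
          · subst h; exact le_trans (hinner.2 b hb) ih1
          · exact ih2 r h b hb
        · rcases ih3 with h | ⟨r, hr, b, hb, he⟩
          · rcases hmem with h2 | ⟨b, hb, he⟩
            · left; rw [h, h2]
            · right; exact ⟨p, by simp, b, hb, by rw [h, he]⟩
          · right; exact ⟨r, by simp [hr], b, hb, he⟩
  have h := gen q 0
  rw [← B_shape hfit] at h
  refine ⟨h.1, ?_, ?_⟩
  · intro p hp b hb
    rw [← innerVal_eq_cntW q K (cxOf K p.1) b hK]
    exact h.2.1 p hp b hb
  · rcases h.2.2 with h0 | ⟨p, hp, b, hb, he⟩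
    · left; exact h0
    · right
      exact ⟨p, hp, b, hb, by rw [he, innerVal_eq_cntW q K (cxOf K p.1) b hK]⟩

-- any positive window anchored at (i,j) with 1 ≤ i,j is dominated by a candidate anchor
lemma dominate {K : Int} {q : List (Int × Int)} (hK : 0 ≤ K)
    (i j : Int) (hi : 1 ≤ i) (hj : 1 ≤ j) (hpos : 0 < cntW q K i j) :
    ∃ p ∈ q, ∃ b ∈ bsOf q K (cxOf K p.1),
      cntW q K i j ≤ cntW q K (cxOf K p.1) (cxOf K b) := by
  set F := q.filter (winP K i j) with hF
  have hFne : F ≠ [] := by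
    intro h
    rw [cntW, ← hF, h] at hpos
    simp at hpos
  obtain ⟨pm, hpm⟩ : ∃ pm, PySem.List.max? F (fun r => r.1) = some pm := by
    rcases h : PySem.List.max? F (fun r => r.1) with _ | pm
    · exact absurd ((PySem.List.max?_eq_none_iff F (fun r => r.1)).mp h) hFne
    · exact ⟨pm, rfl⟩
  obtain ⟨qm, hqm⟩ : ∃ qm, PySem.List.max? F (fun r => r.2) = some qm := by
    rcases h : PySem.List.max? F (fun r => r.2) with _ | qm
    · exact absurd ((PySem.List.max?_eq_none_iff F (fun r => r.2)).mp h) hFne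
    · exact ⟨qm, rfl⟩
  have hpmF : pm ∈ F := PySem.List.max?_mem hpm
  have hqmF : qm ∈ F := PySem.List.max?_mem hqm
  have hpmq : pm ∈ q := List.mem_of_mem_filter hpmF
  have hwin : ∀ r ∈ F, i ≤ r.1 ∧ r.1 ≤ i + K ∧ j ≤ r.2 ∧ r.2 ≤ j + K := by
    intro r hr
    have := List.of_mem_filter hr
    rw [winP] at this
    exact of_decide_eq_true this
  have hpmw := hwin pm hpmF
  have hqmw := hwin qm hqmF
  set cx := cxOf K pm.1 with hcx
  have hcxv : cx = max 1 (pm.1 - K) := rfl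
  have hxpart : ∀ r ∈ F, cx ≤ r.1 ∧ r.1 ≤ cx + K := by
    intro r hr
    have hrw := hwin r hr
    have hrle := PySem.List.max?_isMax hpm r hr
    rw [hcxv]
    constructor <;> omega
  -- qm lies in the strip of cx, so its second coordinate is a member of bs
  have hqmb : qm.2 ∈ bsOf q K cx := by
    rw [bsOf, PySem.List.mem_sorted]
    apply List.mem_map.mpr
    refine ⟨qm, ?_, rfl⟩
    apply List.mem_filter.mpr
    refine ⟨List.mem_of_mem_filter hqmF, ?_⟩
    have := hxpart qm hqmF
    simp only [decide_eq_true_eq]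
    omega
  set cy := cxOf K qm.2 with hcy
  have hcyv : cy = max 1 (qm.2 - K) := rfl
  have hypart : ∀ r ∈ F, cy ≤ r.2 ∧ r.2 ≤ cy + K := by
    intro r hr
    have hrw := hwin r hr
    have hrle := PySem.List.max?_isMax hqm r hr
    rw [hcyv]
    constructor <;> omega
  refine ⟨pm, hpmq, qm.2, hqmb, ?_⟩
  rw [cntW, cntW, ← hF, ← hcx, ← hcy]
  have hmono : F.length ≤ (q.filter (winP K cx cy)).length := by
    rw [hF, ← List.countP_eq_length_filter, ← List.countP_eq_length_filter]
    apply List.countP_mono_left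
    intro r hr hwr
    have hrF : r ∈ F := List.mem_filter.mpr ⟨hr, hwr⟩
    have h1 := hxpart r hrF
    have h2 := hypart r hrF
    rw [winP]
    apply decide_eq_true
    exact ⟨h1.1, h1.2, h2.1, h2.2⟩
  exact_mod_cast hmono

-- ===== VERDICT (by name: the statement is the Claim_ definition above) =====
theorem main_py_spec : Claim_equal_main_py := by
  intro N K q _ hpre
  unfold Spec_main_py
  obtain ⟨hne, hex, hbnd, hdisj⟩ := hpre
  obtain ⟨px, hpx, hpxe⟩ := List.mem_map.mp
    (pyMaxInt_mem (show q.map Prod.fst ≠ [] by simpa using hne))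
  obtain ⟨py, hpy, hpye⟩ := List.mem_map.mp
    (pyMaxInt_mem (show q.map Prod.snd ≠ [] by simpa using hne))
  obtain ⟨e, he, hes⟩ := hex
  have he1 : e.1 ≤ pyMaxInt (q.map Prod.fst) := pyMaxInt_le (List.mem_map.mpr ⟨e, he, rfl⟩)
  have he2 : e.2 ≤ pyMaxInt (q.map Prod.snd) := pyMaxInt_le (List.mem_map.mpr ⟨e, he, rfl⟩)
  have hbx := hbnd px hpx
  have hby := hbnd py hpy
  have hM1 : 1 ≤ MAXiOf q := by rw [MAXiOf]; omega
  have hMle : MAXiOf q ≤ 5001 := by rw [MAXiOf]; omega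
  have hMq : (Mq q : Int) = MAXiOf q := by rw [Mq]; omega
  have hMpre : MAXpre q = MAXiOf q := MAXpre_eq hne ⟨e, he, hes⟩
  have hside : MAXiOf q = sideOf q + 1 := rfl
  rcases hdisj with hK1 | hKneg | hKbig | ⟨hK, hcoord⟩
  · -- K = -1: both return 0
    subst hK1
    rw [A_zero_negone hMq, B_zero_negK (by omega)]
  · -- K ≤ -2·MAX: both return 0
    rw [A_zero_negbig hMq (by omega), B_zero_negK (by omega)]
  · -- K ≥ MAX-1 with arbitrary admitted coordinates: both return 0
    rw [A_zero_bigK (by omega), B_zero (fun p _ => by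
      have h1 : 1 ≤ cxOf K p.1 := by simp only [cxOf]; omega
      omega)]
  · -- the clean regime: 0 ≤ K, all coordinates in [0, 5000]
    have hclean : CleanQ K q := by
      refine ⟨hne, hK, fun p hp => ?_⟩
      have h1 := hcoord p hp
      have h2 := hbnd p hp
      exact ⟨h1.1, h2.1, h1.2, h2.2.1⟩
    obtain ⟨hM1', hMq', hWQ, hco⟩ := pre_facts hclean
    by_cases hg : K + 1 > sideOf q
    · rw [A_zero_bigK (by omega), B_zero (fun p _ => by
        have h1 : 1 ≤ cxOf K p.1 := by simp only [cxOf]; omega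
        omega)]
    · have hfit : ∀ p ∈ q, ¬ (cxOf K p.1 + K > sideOf q) := by
        intro p hp
        have hb := hco p hp
        simp only [cxOf]
        omega
      obtain ⟨hBnn, hBub, hBcases⟩ := B_props N hK hfit
      have le1 : main_py N K q ≤ main_py_alt N K q := by
        rcases A_cases N hclean with h0 | ⟨i, j, hv, he'⟩
        · omega
        · rw [he']
          have hnn : 0 ≤ cntW q K (i:Int) (j:Int) := by
            rw [cntW]; exact Int.natCast_nonneg _
          by_cases hz : cntW q K (i:Int) (j:Int) = 0
          · omega
          · obtain ⟨p, hp, b, hb, hle⟩ := dominate (q := q) hK (i:Int) (j:Int)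
              (by exact_mod_cast hv.1) (by exact_mod_cast hv.2.1) (by omega)
            exact le_trans hle (hBub p hp b hb)
      have le2 : main_py_alt N K q ≤ main_py N K q := by
        rcases hBcases with h0 | ⟨p, hp, b, hb, he'⟩
        · rw [h0]; exact A_ge_zero hclean
        · rw [he']
          have hpb := hco p hp
          have hbq : ∃ r ∈ q, r.2 = b := by
            have hmem := hb
            rw [bsOf, PySem.List.mem_sorted] at hmem
            obtain ⟨r, hr, hre⟩ := List.mem_map.mp hmem
            exact ⟨r, List.mem_of_mem_filter hr, hre⟩
          obtain ⟨r, hrq, hre⟩ := hbq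
          have hrb := hco r hrq
          have hb1 : 1 ≤ cxOf K p.1 ∧ cxOf K p.1 + K < (Mq q : Int) := by
            simp only [cxOf]; omega
          have hb2 : 1 ≤ cxOf K b ∧ cxOf K b + K < (Mq q : Int) := by
            simp only [cxOf]; omega
          have hv : 1 ≤ (cxOf K p.1).toNat ∧ 1 ≤ (cxOf K b).toNat ∧
              (((cxOf K p.1).toNat : Nat) : Int) + K < MAXiOf q ∧
              (((cxOf K b).toNat : Nat) : Int) + K < MAXiOf q ∧
              -(MAXiOf q) ≤ (((cxOf K p.1).toNat : Nat) : Int) + K ∧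
              -(MAXiOf q) ≤ (((cxOf K b).toNat : Nat) : Int) + K := by
            omega
          have hA := A_ge_cnt N hclean (cxOf K p.1).toNat (cxOf K b).toNat hv
          have e1 : (((cxOf K p.1).toNat : Nat) : Int) = cxOf K p.1 := by omega
          have e2 : (((cxOf K b).toNat : Nat) : Int) = cxOf K b := by omega
          rw [e1, e2] at hA
          exact hA
      omega
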